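-- pv_equiv track=rewrite | github.com/DANU011/CodingTest | DANU/python/3023.py | create_expanded_grid
-- ===== SOURCE A (Python) =====
-- def create_expanded_grid(R, C, grid):
--     b = [[0 for _ in range(2*C)] for _ in range(2*R)]
--     for i in range(R):
--         for j in range(C):
--             b[i][j] = grid[i][j]
--     for i in range(R):
--         for j in range(C, 2*C):
--             b[i][j] = b[i][2*C-j-1]
--     for i in range(R, 2*R):
--         for j in range(2*C):
--             b[i][j] = b[2*R-i-1][j]
--     return b
-- ===== SOURCE B (Python) =====
-- def create_expanded_grid(R, C, grid):
--     def fold(k, n):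
--         return k if k < n else 2 * n - 1 - k
--     return [[grid[fold(i, R)][fold(j, C)] for j in range(2 * C)]
--             for i in range(2 * R)]
-- ===== Notes on version B (the rewrite author's own statement) =====
-- stated objective: simpler
-- what changed: A preallocates a 2Rx2C zero matrix and mutates it in three staged passes (copy, horizontal mirror, vertical mirror, each reading cells written by an earlier pass); B never builds intermediate state at all: it computes every output cell directly from the source grid through the closed-form index map fold(k,n)=k if k<n else 2n-1-k, in one doubly-indexed comprehension.
import Mathlib
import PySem

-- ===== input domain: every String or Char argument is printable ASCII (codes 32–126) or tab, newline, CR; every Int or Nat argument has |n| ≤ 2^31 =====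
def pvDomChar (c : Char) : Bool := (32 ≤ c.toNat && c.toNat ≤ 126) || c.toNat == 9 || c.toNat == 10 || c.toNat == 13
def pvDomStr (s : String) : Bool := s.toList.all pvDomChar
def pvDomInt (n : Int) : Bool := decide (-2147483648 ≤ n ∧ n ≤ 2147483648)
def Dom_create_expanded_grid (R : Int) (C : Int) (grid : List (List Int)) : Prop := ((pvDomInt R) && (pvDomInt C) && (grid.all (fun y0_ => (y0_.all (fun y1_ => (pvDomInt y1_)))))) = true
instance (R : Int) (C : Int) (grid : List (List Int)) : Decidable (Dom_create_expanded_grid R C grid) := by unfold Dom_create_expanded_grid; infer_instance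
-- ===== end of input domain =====

-- B replaces A's preallocated 2R×2C array and its three mutating passes by computing every output
-- cell directly from the source grid through the closed-form index map fold(k,n)=k if k<n else
-- 2n-1-k, in one doubly-indexed comprehension (objective: simpler). RETURN-VALUE equivalence is proved.

-- shared transliteration of Python's 2-level indexing grid[i][j] (total form; in-range under Pre_)
def pvGet2 (xs : List (List Int)) (i j : Int) : Int :=
  PySem.List.pyGetD (PySem.List.pyGetD xs i []) j 0

-- transliteration of the assignment b[i][j] = v
def pvSet2 (b : List (List Int)) (i j : Int) (v : Int) : List (List Int) :=
  PySem.List.pySetD b i (PySem.List.pySetD (PySem.List.pyGetD b i []) j v)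

-- ===== PORT A =====
def create_expanded_grid (R : Int) (C : Int) (grid : List (List Int)) : List (List Int) :=
  -- b = [[0 for _ in range(2*C)] for _ in range(2*R)]
  let b0 : List (List Int) :=
    (PySem.List.pyRange 0 (2*R) 1).map (fun _ => (PySem.List.pyRange 0 (2*C) 1).map (fun _ => (0 : Int)))
  -- for i in range(R): for j in range(C): b[i][j] = grid[i][j]
  let b1 := (PySem.List.pyRange 0 R 1).foldl (fun b i =>
    (PySem.List.pyRange 0 C 1).foldl (fun b j => pvSet2 b i j (pvGet2 grid i j)) b) b0
  -- for i in range(R): for j in range(C, 2*C): b[i][j] = b[i][2*C-j-1]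
  let b2 := (PySem.List.pyRange 0 R 1).foldl (fun b i =>
    (PySem.List.pyRange C (2*C) 1).foldl (fun b j => pvSet2 b i j (pvGet2 b i (2*C - j - 1))) b) b1
  -- for i in range(R, 2*R): for j in range(2*C): b[i][j] = b[2*R-i-1][j]
  (PySem.List.pyRange R (2*R) 1).foldl (fun b i =>
    (PySem.List.pyRange 0 (2*C) 1).foldl (fun b j => pvSet2 b i j (pvGet2 b (2*R - i - 1) j)) b) b2

-- ===== PORT B =====
-- def fold(k, n): return k if k < n else 2*n - 1 - k
def pvFold (k n : Int) : Int := if k < n then k else 2*n - 1 - k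

-- return [[grid[fold(i,R)][fold(j,C)] for j in range(2*C)] for i in range(2*R)]
def create_expanded_grid_alt (R : Int) (C : Int) (grid : List (List Int)) : List (List Int) :=
  (PySem.List.pyRange 0 (2*R) 1).map (fun i =>
    (PySem.List.pyRange 0 (2*C) 1).map (fun j =>
      pvGet2 grid (pvFold i R) (pvFold j C)))

-- ===== PRECONDITION & SPEC =====
-- Pre_ excludes exactly the inputs where A raises IndexError: R > 0 and C > 0 while grid has fewer
-- than R rows or one of its first R rows is shorter than C.
def Pre_create_expanded_grid (R : Int) (C : Int) (grid : List (List Int)) : Prop :=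
  0 < R → 0 < C → (R ≤ (grid.length : Int) ∧ ∀ row ∈ grid.take R.toNat, C ≤ (row.length : Int))
instance (R : Int) (C : Int) (grid : List (List Int)) : Decidable (Pre_create_expanded_grid R C grid) := by
  unfold Pre_create_expanded_grid; infer_instance

def pvWitness_create_expanded_grid : Int × Int × List (List Int) := (2, 2, [[1, 2], [3, 4]])

def Spec_create_expanded_grid (R : Int) (C : Int) (grid : List (List Int)) (out : List (List Int)) : Prop := out = create_expanded_grid_alt R C grid
instance (R : Int) (C : Int) (grid : List (List Int)) (out : List (List Int)) : Decidable (Spec_create_expanded_grid R C grid out) := by unfold Spec_create_expanded_grid; infer_instance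

-- ===== CLAIM (what is proved, stated in full; the proofs are below) =====
def Claim_equal_create_expanded_grid : Prop := ∀ (R : Int) (C : Int) (grid : List (List Int)), Dom_create_expanded_grid R C grid → Pre_create_expanded_grid R C grid → Spec_create_expanded_grid R C grid (create_expanded_grid R C grid)

-- ===== LEMMAS AND PROOFS =====

-- the quarter row [grid[i][j] for j in range(C)] and the top half, in Nat form
def pvQ (grid : List (List Int)) (cn : Nat) (i : Nat) : List Int :=
  (List.range cn).map (fun (j : Nat) => pvGet2 grid (i : Int) (j : Int))

def pvTop (grid : List (List Int)) (rn cn : Nat) : List (List Int) :=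
  (List.range rn).map (fun i => pvQ grid cn i ++ (pvQ grid cn i).reverse)

-- hoisting: a loop that only writes row i of the matrix is a row-level loop
theorem pv_hoist {α : Type} (js : List Nat) (b : List α) (i : Nat) (d : α)
    (g : List α → α → Nat → α)
    (hg : ∀ (x r : α) (j : Nat), g (b.set i x) r j = g b r j) :
    js.foldl (fun b' j => b'.set i (g b' (b'.getD i d) j)) b
      = b.set i (js.foldl (g b) (b.getD i d)) := by
  induction js generalizing b with
  | nil =>
    by_cases h : i < b.length
    · simp only [List.foldl_nil, List.getD_eq_getElem _ _ h]
      exact (List.set_getElem_self h).symm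
    · simp only [List.foldl_nil]
      exact (List.set_eq_of_length_le (by omega)).symm
  | cons j js ih =>
    simp only [List.foldl_cons]
    by_cases h : i < b.length
    · have hset : ∀ (x r : α) (j' : Nat),
          g ((b.set i (g b (b.getD i d) j)).set i x) r j'
            = g (b.set i (g b (b.getD i d) j)) r j' := by
        intro x r j'
        rw [List.set_set, hg, hg]
      rw [ih _ hset]
      have h1 : (b.set i (g b (b.getD i d) j)).getD i d = g b (b.getD i d) j := by
        rw [List.getD_eq_getElem _ _ (by simpa using h)]
        exact List.getElem_set_self (by simpa using h)
      rw [h1, List.set_set]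
      congr 1
      refine PySem.List.foldl_congr_mem js _ _ _ ?_
      intro acc x _
      exact hg _ _ _
    · have hb : b.set i (g b (b.getD i d) j) = b := List.set_eq_of_length_le (by omega)
      rw [hb, ih _ hg, List.set_eq_of_length_le (by omega), List.set_eq_of_length_le (by omega)]

-- writing positions 0..m-1 of a list in order, each from the not-yet-written cell
theorem pv_fill {α : Type} (m : Nat) (F : Nat → α → α) (b : List α) (d : α)
    (hm : m ≤ b.length) :
    (List.range m).foldl (fun acc i => acc.set i (F i (acc.getD i d))) b
      = (List.range m).map (fun i => F i (b.getD i d)) ++ b.drop m := by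
  induction m with
  | zero => simp
  | succ m ih =>
    rw [List.range_succ, List.foldl_append, List.foldl_cons, List.foldl_nil,
      ih (by omega), List.map_append]
    have hlen : ((List.range m).map (fun i => F i (b.getD i d))).length = m := by simp
    have hdrop : b.drop m = b[m]'(by omega) :: b.drop (m + 1) :=
      List.drop_eq_getElem_cons (by omega)
    rw [hdrop]
    have h1 : ((List.range m).map (fun i => F i (b.getD i d)) ++
        b[m]'(by omega) :: b.drop (m + 1)).getD m d = b[m]'(by omega) := by
      rw [List.getD_append_right _ _ _ _ (by omega), hlen, Nat.sub_self]
      rfl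
    rw [h1, List.set_append_right _ _ (by omega), hlen, Nat.sub_self, List.set_cons_zero]
    simp
    rw [List.getElem?_eq_getElem (show m < b.length by omega)]
    rfl

-- building the mirrored second half, one cell/row at a time
theorem pv_mirror_step {α : Type} (q z : List α) (n k : Nat)
    (hq : q.length = n) (hz : z.length = n) (hk : k < n) (v : α)
    (hv : v = q[n - 1 - k]'(by omega)) :
    (q ++ q.reverse.take k ++ z.drop k).set (n + k) v
      = q ++ q.reverse.take (k + 1) ++ z.drop (k + 1) := by
  have htk : (q.reverse.take k).length = k := by
    simp; omega
  have hzd : z.drop k = z[k]'(by omega) :: z.drop (k + 1) :=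
    List.drop_eq_getElem_cons (by omega)
  have hpre : (q ++ q.reverse.take k).length = n + k := by simp [hq, htk]
  have htake : q.reverse.take (k + 1) = q.reverse.take k ++ [v] := by
    rw [List.take_add_one, List.getElem?_eq_getElem (by simp [hq]; omega)]
    simp [List.getElem_reverse, hq, hv]
  rw [hzd, List.set_append_right _ _ (by rw [hpre]), hpre, Nat.sub_self, List.set_cons_zero,
    htake]
  simp [List.append_assoc]

theorem pv_mirror {α : Type} (n : Nat) (q z : List α)
    (step : List α → Nat → List α) (hq : q.length = n) (hz : z.length = n)
    (hstep : ∀ k, k < n →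
      step (q ++ q.reverse.take k ++ z.drop k) k = q ++ q.reverse.take (k + 1) ++ z.drop (k + 1)) :
    (List.range n).foldl step (q ++ z) = q ++ q.reverse := by
  have aux : ∀ m, m ≤ n → (List.range m).foldl step (q ++ z)
      = q ++ q.reverse.take m ++ z.drop m := by
    intro m hm
    induction m with
    | zero => simp
    | succ m ih =>
      rw [List.range_succ, List.foldl_append, List.foldl_cons, List.foldl_nil, ih (by omega)]
      exact hstep m (by omega)
  have h := aux n le_rfl
  rw [h, List.take_of_length_le (by simp [hq]), List.drop_of_length_le (by omega)]
  simp

-- (range m).map (r.getD . d) recovers r when r has length m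
theorem pv_map_getD {α : Type} (r : List α) (m : Nat) (d : α) (hr : r.length = m) :
    (List.range m).map (fun j => r.getD j d) = r := by
  apply List.ext_getElem (by simp [hr])
  intro i h1 h2
  rw [List.getElem_map, List.getElem_range, List.getD_eq_getElem _ _ (by omega)]

-- pv_fill with a write that ignores the old cell
theorem pv_fill_const {α : Type} (m : Nat) (v : Nat → α) (b : List α) (d : α)
    (hm : m ≤ b.length) :
    (List.range m).foldl (fun acc i => acc.set i (v i)) b
      = (List.range m).map v ++ b.drop m := by
  have h := pv_fill m (fun i _ => v i) b d hm
  simpa using h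

-- mapping k ↦ g (n-1-k) over range n is the reverse of mapping g
theorem pv_map_rev {α : Type} (n : Nat) (g : Nat → α) :
    (List.range n).map (fun k => g (n - 1 - k)) = ((List.range n).map g).reverse := by
  apply List.ext_getElem (by simp)
  intro i h1 h2
  simp only [List.getElem_map, List.getElem_range, List.getElem_reverse, List.length_map,
    List.length_range]

-- B's port in the main case: splitting each range at its midpoint turns the folded
-- index map into "first half = pvTop row, second half = reverse"
theorem pv_alt_pos (grid : List (List Int)) (rn cn : Nat) (hr : 0 < rn) (hc : 0 < cn) :
    create_expanded_grid_alt (rn : Int) (cn : Int) grid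
      = pvTop grid rn cn ++ (pvTop grid rn cn).reverse := by
  have e1 : ((2*(rn:Int)) - 0).toNat = rn + rn := by omega
  have e2 : ((2*(cn:Int)) - 0).toNat = cn + cn := by omega
  unfold create_expanded_grid_alt
  rw [PySem.List.pyRange_one, PySem.List.pyRange_one, e1, e2]
  simp only [List.map_map, Function.comp_def, Int.zero_add]
  -- the row produced for a folded index i < rn
  have hrow : ∀ i : Nat, i < rn →
      (List.range (cn + cn)).map (fun j : Nat => pvGet2 grid (pvFold (i : Int) rn) (pvFold (j : Int) cn))
        = pvQ grid cn i ++ (pvQ grid cn i).reverse := by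
    intro i hi
    have hfi : pvFold (i : Int) rn = (i : Int) := by
      unfold pvFold; rw [if_pos (by exact_mod_cast hi)]
    rw [List.range_add, List.map_append, List.map_map]
    congr 1
    · apply List.map_congr_left
      intro j hj
      have hj' : j < cn := List.mem_range.mp hj
      have hfj : pvFold (j : Int) cn = (j : Int) := by
        unfold pvFold; rw [if_pos (by exact_mod_cast hj')]
      rw [hfi, hfj]
    · have : ∀ k ∈ List.range cn,
          pvGet2 grid (pvFold (i : Int) rn) (pvFold ((cn + k : Nat) : Int) cn)
            = pvGet2 grid (i : Int) ((cn - 1 - k : Nat) : Int) := by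
        intro k hk
        have hk' : k < cn := List.mem_range.mp hk
        have hfj : pvFold ((cn + k : Nat) : Int) cn = ((cn - 1 - k : Nat) : Int) := by
          unfold pvFold; rw [if_neg (by push_cast; omega)]; push_cast; omega
        rw [hfi, hfj]
      rw [List.map_congr_left (fun k hk => by
        simp only [Function.comp_apply]
        exact this k hk)]
      exact pv_map_rev cn (fun j => pvGet2 grid (i : Int) (j : Int))
  -- split the outer range
  rw [show List.range (rn + rn) = List.range rn ++ (List.range rn).map (fun k => rn + k) from
    List.range_add, List.map_append, List.map_map]
  congr 1
  · unfold pvTop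
    apply List.map_congr_left
    intro i hi
    exact hrow i (List.mem_range.mp hi)
  · have hsec : ∀ k ∈ List.range rn,
        (List.range (cn + cn)).map
            (fun j : Nat => pvGet2 grid (pvFold ((rn + k : Nat) : Int) rn) (pvFold (j : Int) cn))
          = pvQ grid cn (rn - 1 - k) ++ (pvQ grid cn (rn - 1 - k)).reverse := by
      intro k hk
      have hk' : k < rn := List.mem_range.mp hk
      have hfi : pvFold ((rn + k : Nat) : Int) rn = ((rn - 1 - k : Nat) : Int) := by
        unfold pvFold; rw [if_neg (by push_cast; omega)]; push_cast; omega
      rw [show (fun j : Nat => pvGet2 grid (pvFold ((rn + k : Nat) : Int) rn) (pvFold (j : Int) cn))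
            = (fun j : Nat => pvGet2 grid (pvFold ((rn - 1 - k : Nat) : Int) rn) (pvFold (j : Int) cn)) from by
          funext j
          rw [hfi, show pvFold ((rn - 1 - k : Nat) : Int) rn = ((rn - 1 - k : Nat) : Int) from by
            unfold pvFold; rw [if_pos (by omega)]]]
      exact hrow (rn - 1 - k) (by omega)
    rw [List.map_congr_left (fun k hk => by
      simp only [Function.comp_apply]
      exact hsec k hk)]
    unfold pvTop
    exact pv_map_rev rn (fun i => pvQ grid cn i ++ (pvQ grid cn i).reverse)

-- B's port when R ≤ 0
theorem pv_alt_negR (R C : Int) (grid : List (List Int)) (hR : R ≤ 0) :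
    create_expanded_grid_alt R C grid = [] := by
  unfold create_expanded_grid_alt
  rw [PySem.List.pyRange_one_eq_nil (show 2*R ≤ 0 by omega)]
  rfl

-- B's port when R > 0 but C ≤ 0: 2R empty rows
theorem pv_alt_negC (R C : Int) (grid : List (List Int)) (hR : 0 < R) (hC : C ≤ 0) :
    create_expanded_grid_alt R C grid = List.replicate (2*R.toNat) [] := by
  unfold create_expanded_grid_alt
  rw [PySem.List.pyRange_one_eq_nil (show 2*C ≤ 0 by omega)]
  simp only [List.map_nil, List.map_const', PySem.List.length_pyRange_one]
  congr 1
  omega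

-- A's port when R ≤ 0: every range is empty
theorem pv_A_negR (R C : Int) (grid : List (List Int)) (hR : R ≤ 0) :
    create_expanded_grid R C grid = [] := by
  unfold create_expanded_grid
  rw [PySem.List.pyRange_one_eq_nil (show 2*R ≤ 0 by omega),
      PySem.List.pyRange_one_eq_nil (show R ≤ 0 by omega),
      PySem.List.pyRange_one_eq_nil (show 2*R ≤ R by omega)]
  simp

-- A's port when R > 0 but C ≤ 0: 2R empty rows
theorem pv_A_negC (R C : Int) (grid : List (List Int)) (hR : 0 < R) (hC : C ≤ 0) :
    create_expanded_grid R C grid = List.replicate (2*R.toNat) [] := by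
  unfold create_expanded_grid
  rw [PySem.List.pyRange_one_eq_nil (show 2*C ≤ 0 by omega),
      PySem.List.pyRange_one_eq_nil (show C ≤ 0 by omega),
      PySem.List.pyRange_one_eq_nil (show 2*C ≤ C by omega)]
  simp only [List.map_nil, List.foldl_nil]
  rw [PySem.List.foldl_ignore, PySem.List.foldl_ignore, PySem.List.foldl_ignore]
  rw [PySem.List.pyRange_one, Int.sub_zero]
  simp only [List.map_map, Function.comp_def, List.map_const', List.length_range]
  congr 1
  omega

-- A's port in the main case, via the three passes
theorem pv_A_pos (grid : List (List Int)) (rn cn : Nat) (hr : 0 < rn) (hc : 0 < cn) :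
    create_expanded_grid (rn : Int) (cn : Int) grid
      = pvTop grid rn cn ++ (pvTop grid rn cn).reverse := by
  have e1 : ((2*(rn:Int)) - 0).toNat = 2*rn := by omega
  have e3 : (((cn:Int)) - 0).toNat = cn := by omega
  have e2 : (((rn:Int)) - 0).toNat = rn := by omega
  have e4 : ((2*(cn:Int)) - 0).toNat = 2*cn := by omega
  have e5 : (2*(cn:Int) - (cn:Int)).toNat = cn := by omega
  have e6 : (2*(rn:Int) - (rn:Int)).toNat = rn := by omega
  have hqlen : ∀ i : Nat, (pvQ grid cn i).length = cn := by intro i; simp [pvQ]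
  have hM1len : ((List.range rn).map
      (fun i => pvQ grid cn i ++ List.replicate cn (0:Int))).length = rn := by simp
  have hTlen : (pvTop grid rn cn).length = rn := by simp [pvTop]
  have hTget : ∀ (i : Nat) (h : i < rn), (pvTop grid rn cn)[i]'(by simp [pvTop]; omega)
      = pvQ grid cn i ++ (pvQ grid cn i).reverse := by
    intro i h
    simp [pvTop]
  have hTrow : ∀ (i : Nat) (h : i < rn),
      ((pvTop grid rn cn)[i]'(by simp [pvTop]; omega)).length = 2*cn := by
    intro i h
    rw [hTget i h]
    simp [hqlen]
    omega
  unfold create_expanded_grid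
  simp only [PySem.List.pyRange_one, e1, e2, e3, e4, e5, e6, List.foldl_map, List.map_map,
    zero_add, pvSet2, PySem.List.pySetD_natCast, PySem.List.pyGetD_natCast,
    Function.comp_def, List.map_const', List.length_range]
  -- ===== pass 1 =====
  have hin1 : ∀ (b : List (List Int)) (k : Nat),
      (List.range cn).foldl (fun b j => b.set k ((b.getD k []).set j (pvGet2 grid ↑k ↑j))) b
        = b.set k ((List.range cn).foldl (fun r j => r.set j (pvGet2 grid ↑k ↑j)) (b.getD k [])) :=
    fun b k => pv_hoist (List.range cn) b k []
      (fun _ r j => r.set j (pvGet2 grid ↑k ↑j)) (fun _ _ _ => rfl)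
  rw [PySem.List.foldl_congr_mem (List.range rn) _
    (fun b k => b.set k ((List.range cn).foldl (fun r j => r.set j (pvGet2 grid ↑k ↑j)) (b.getD k [])))
    _ (fun b k _ => hin1 b k)]
  rw [pv_fill rn (fun k r => (List.range cn).foldl (fun r j => r.set j (pvGet2 grid ↑k ↑j)) r)
    (List.replicate (2*rn) (List.replicate (2*cn) (0:Int))) [] (by simp; omega)]
  have hmap1 : (List.range rn).map
      (fun k => (List.range cn).foldl (fun r j => r.set j (pvGet2 grid ↑k ↑j))
        ((List.replicate (2*rn) (List.replicate (2*cn) (0:Int))).getD k []))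
      = (List.range rn).map (fun i => pvQ grid cn i ++ List.replicate cn (0:Int)) := by
    apply List.map_congr_left
    intro k hk
    have hk' : k < rn := List.mem_range.mp hk
    rw [List.getD_replicate _ (by omega)]
    rw [pv_fill_const cn (fun j => pvGet2 grid ↑k ↑j) _ 0 (by simp; omega)]
    rw [List.drop_replicate]
    have : 2*cn - cn = cn := by omega
    rw [this]
    rfl
  rw [hmap1, List.drop_replicate]
  have hrr : 2*rn - rn = rn := by omega
  rw [hrr]
  -- ===== pass 2 =====
  have hin2 : ∀ (b : List (List Int)) (k : Nat),
      (List.range cn).foldl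
        (fun b t => b.set k (PySem.List.pySetD (b.getD k []) (↑cn + ↑t)
          (pvGet2 b ↑k (2*(cn:Int) - (↑cn + ↑t) - 1)))) b
      = b.set k ((List.range cn).foldl
          (fun r t => r.set (cn + t) (r.getD (cn - 1 - t) 0)) (b.getD k [])) := by
    intro b k
    rw [PySem.List.foldl_congr_mem (List.range cn) _
      (fun b t => b.set k ((b.getD k []).set (cn + t) ((b.getD k []).getD (cn - 1 - t) 0)))
      _ ?_]
    · exact pv_hoist (List.range cn) b k []
        (fun _ r t => r.set (cn + t) (r.getD (cn - 1 - t) 0)) (fun _ _ _ => rfl)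
    · intro b' t ht
      have ht' : t < cn := List.mem_range.mp ht
      have c1 : ((cn:Int) + ↑t) = ((cn + t : Nat) : Int) := by push_cast; ring
      have c2 : (2*(cn:Int) - ((cn + t : Nat) : Int) - 1) = ((cn - 1 - t : Nat) : Int) := by
        push_cast; omega
      rw [c1, c2]
      simp only [pvGet2, PySem.List.pyGetD_natCast, PySem.List.pySetD_natCast]
  have hout2 := PySem.List.foldl_congr_mem (List.range rn)
    (fun (b : List (List Int)) (k : Nat) => (List.range cn).foldl
      (fun (b : List (List Int)) (t : Nat) => b.set k (PySem.List.pySetD (b.getD k []) (↑cn + ↑t)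
        (pvGet2 b ↑k (2*(cn:Int) - (↑cn + ↑t) - 1)))) b)
    (fun b k => b.set k ((List.range cn).foldl
      (fun r t => r.set (cn + t) (r.getD (cn - 1 - t) 0)) (b.getD k [])))
    ((List.range rn).map (fun i => pvQ grid cn i ++ List.replicate cn (0:Int))
      ++ List.replicate rn (List.replicate (2*cn) (0:Int)))
    (fun b k _ => hin2 b k)
  rw [hout2]
  have hfill2 := pv_fill rn (fun k r => (List.range cn).foldl
      (fun (r : List Int) (t : Nat) => r.set (cn + t) (r.getD (cn - 1 - t) 0)) r)
    ((List.range rn).map (fun i => pvQ grid cn i ++ List.replicate cn (0:Int))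
      ++ List.replicate rn (List.replicate (2*cn) (0:Int))) [] (by simp)
  beta_reduce at hfill2
  rw [hfill2]
  have hmap2 : (List.range rn).map
      (fun k => (List.range cn).foldl (fun r t => r.set (cn + t) (r.getD (cn - 1 - t) 0))
        (((List.range rn).map (fun i => pvQ grid cn i ++ List.replicate cn (0:Int))
          ++ List.replicate rn (List.replicate (2*cn) (0:Int))).getD k []))
      = pvTop grid rn cn := by
    unfold pvTop
    apply List.map_congr_left
    intro k hk
    have hk' : k < rn := List.mem_range.mp hk
    rw [List.getD_append _ _ _ _ (by omega)]
    rw [List.getD_eq_getElem _ _ (by simp; omega)]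
    rw [List.getElem_map, List.getElem_range]
    refine pv_mirror cn (pvQ grid cn k) (List.replicate cn (0:Int)) _ (hqlen k) (by simp) ?_
    intro t ht
    have hget : ((pvQ grid cn k ++ (pvQ grid cn k).reverse.take t
        ++ (List.replicate cn (0:Int)).drop t)).getD (cn - 1 - t) 0
        = (pvQ grid cn k)[cn - 1 - t]'(by rw [hqlen]; omega) := by
      rw [List.append_assoc, List.getD_append _ _ _ _ (by rw [hqlen]; omega)]
      exact List.getD_eq_getElem _ _ (by rw [hqlen]; omega)
    rw [List.append_assoc] at hget ⊢
    rw [hget] at *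
    rw [← List.append_assoc]
    exact pv_mirror_step (pvQ grid cn k) (List.replicate cn (0:Int)) cn t (hqlen k) (by simp) ht _ rfl
  rw [hmap2]
  have hdrop2 := List.drop_left
    (l₁ := (List.range rn).map (fun i => pvQ grid cn i ++ List.replicate cn (0:Int)))
    (l₂ := List.replicate rn (List.replicate (2*cn) (0:Int)))
  rw [hM1len] at hdrop2
  rw [hdrop2]
  -- ===== pass 3 =====
  have hin3 : ∀ (k : Nat), k < rn → ∀ (b : List (List Int)),
      (List.range (2*cn)).foldl
        (fun b u => PySem.List.pySetD b (↑rn + ↑k)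
          ((PySem.List.pyGetD b (↑rn + ↑k) []).set u
            (pvGet2 b (2*(rn:Int) - (↑rn + ↑k) - 1) ↑u))) b
      = b.set (rn + k) ((List.range (2*cn)).foldl
          (fun r u => r.set u ((b.getD (rn - 1 - k) []).getD u 0)) (b.getD (rn + k) [])) := by
    intro k hk b
    have c1 : ((rn:Int) + ↑k) = ((rn + k : Nat) : Int) := by push_cast; ring
    have c2 : (2*(rn:Int) - ((rn + k : Nat) : Int) - 1) = ((rn - 1 - k : Nat) : Int) := by
      push_cast; omega
    rw [PySem.List.foldl_congr_mem (List.range (2*cn)) _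
      (fun b u => b.set (rn + k) ((b.getD (rn + k) []).set u ((b.getD (rn - 1 - k) []).getD u 0)))
      _ ?_]
    · refine pv_hoist (List.range (2*cn)) b (rn + k) []
        (fun b' r u => r.set u ((b'.getD (rn - 1 - k) []).getD u 0)) ?_
      intro x r u
      beta_reduce
      have hne : rn + k ≠ rn - 1 - k := by omega
      rw [List.getD_eq_getElem?_getD, List.getD_eq_getElem?_getD,
        List.getElem?_set_ne hne]
      rfl
    · intro b' u _
      rw [c1, c2]
      simp only [pvGet2, PySem.List.pyGetD_natCast, PySem.List.pySetD_natCast]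
  have hout3 := PySem.List.foldl_congr_mem (List.range rn)
    (fun (b : List (List Int)) (k : Nat) => (List.range (2*cn)).foldl
      (fun (b : List (List Int)) (u : Nat) => PySem.List.pySetD b (↑rn + ↑k)
        ((PySem.List.pyGetD b (↑rn + ↑k) []).set u
          (pvGet2 b (2*(rn:Int) - (↑rn + ↑k) - 1) ↑u))) b)
    (fun b k => b.set (rn + k) ((List.range (2*cn)).foldl
      (fun r u => r.set u ((b.getD (rn - 1 - k) []).getD u 0)) (b.getD (rn + k) [])))
    (pvTop grid rn cn ++ List.replicate rn (List.replicate (2*cn) (0:Int)))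
    (fun b k hk => hin3 k (List.mem_range.mp hk) b)
  rw [hout3]
  refine pv_mirror rn (pvTop grid rn cn) (List.replicate rn (List.replicate (2*cn) (0:Int))) _
    hTlen (by simp) ?_
  intro k hk
  have hTbound : rn - 1 - k < (pvTop grid rn cn).length := by rw [hTlen]; omega
  have htklen : ((pvTop grid rn cn).reverse.take k).length = k := by simp [hTlen]; omega
  have hsrc : ((pvTop grid rn cn ++ (pvTop grid rn cn).reverse.take k
      ++ (List.replicate rn (List.replicate (2*cn) (0:Int))).drop k)).getD (rn - 1 - k) []
      = (pvTop grid rn cn)[rn - 1 - k]'hTbound := by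
    rw [List.append_assoc, List.getD_append _ _ _ _ hTbound]
    exact List.getD_eq_getElem _ _ hTbound
  have hdest : ((pvTop grid rn cn ++ (pvTop grid rn cn).reverse.take k
      ++ (List.replicate rn (List.replicate (2*cn) (0:Int))).drop k)).getD (rn + k) []
      = List.replicate (2*cn) (0:Int) := by
    rw [List.getD_append_right _ _ _ _ (by simp [hTlen, htklen])]
    have hlen2 : (pvTop grid rn cn ++ (pvTop grid rn cn).reverse.take k).length = rn + k := by
      simp [hTlen, htklen]
    rw [hlen2, Nat.sub_self, List.drop_replicate]
    exact List.getD_replicate _ (by omega)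
  rw [hsrc, hdest]
  rw [pv_fill_const (2*cn) _ _ 0 (by simp)]
  rw [pv_map_getD _ _ _ (hTrow _ (by omega))]
  rw [show (List.replicate (2*cn) (0:Int)).drop (2*cn) = [] from
    List.drop_of_length_le (by simp), List.append_nil]
  exact pv_mirror_step (pvTop grid rn cn) (List.replicate rn (List.replicate (2*cn) (0:Int)))
    rn k hTlen (by simp) hk _ rfl

-- the two ports agree on every input (both read the grid through total defaulted lookups)
theorem pv_main (R C : Int) (grid : List (List Int)) :
    create_expanded_grid R C grid = create_expanded_grid_alt R C grid := by
  rcases (by omega : R ≤ 0 ∨ 0 < R) with hR | hR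
  · rw [pv_A_negR R C grid hR, pv_alt_negR R C grid hR]
  · rcases (by omega : C ≤ 0 ∨ 0 < C) with hC | hC
    · rw [pv_A_negC R C grid hR hC, pv_alt_negC R C grid hR hC]
    · obtain ⟨rn, hrn⟩ : ∃ n : Nat, R = (n:Int) := ⟨R.toNat, by omega⟩
      obtain ⟨cn, hcn⟩ : ∃ n : Nat, C = (n:Int) := ⟨C.toNat, by omega⟩
      subst hrn
      subst hcn
      rw [pv_A_pos grid rn cn (by omega) (by omega),
        pv_alt_pos grid rn cn (by omega) (by omega)]

-- ===== VERDICT (by name: the statement is the Claim_ definition above) =====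
theorem create_expanded_grid_spec : Claim_equal_create_expanded_grid := by
  intro R C grid _ _
  unfold Spec_create_expanded_grid
  exact pv_main R C grid
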